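-- pv_equiv track=rewrite | github.com/jhongarciab/nphonons-bundles | codes/trayectorias/trayectorias_jorge.py | classify_click_train
-- ===== SOURCE A (Python) =====
-- def classify_click_train(times, tau):
--     if len(times) == 0:
--         return 0, 0, 0
--     groups = []
--     current = [times[0]]
--     for t in times[1:]:
--         if (t - current[-1]) <= tau:
--             current.append(t)
--         else:
--             groups.append(current)
--             current = [t]
--     groups.append(current)
--
--     singles = sum(1 for g in groups if len(g) == 1)
--     pairs = sum(1 for g in groups if len(g) == 2)
--     n2 = sum(1 for g in groups if len(g) >= 4)  # proxy para 2n con n=2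
--     return singles, pairs, n2
-- ===== SOURCE B (Python) =====
-- def classify_click_train(times, tau):
--     if len(times) == 0:
--         return 0, 0, 0
--     singles = 0
--     pairs = 0
--     n2 = 0
--     size = 1
--     prev = times[0]
--     for t in times[1:]:
--         if t - prev <= tau:
--             size += 1
--         else:
--             if size == 1:
--                 singles += 1
--             elif size == 2:
--                 pairs += 1
--             elif size >= 4:
--                 n2 += 1
--             size = 1
--         prev = t
--     if size == 1:
--         singles += 1
--     elif size == 2:
--         pairs += 1
--     elif size >= 4:
--         n2 += 1
--     return singles, pairs, n2
-- ===== Notes on version B (the rewrite author's own statement) =====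
-- stated objective: simpler
-- what changed: B never materialises the groups list or three counting passes over it: one linear pass keeps only a running run-size, the previous time and three counters, classifying each run as it closes.
import Mathlib
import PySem

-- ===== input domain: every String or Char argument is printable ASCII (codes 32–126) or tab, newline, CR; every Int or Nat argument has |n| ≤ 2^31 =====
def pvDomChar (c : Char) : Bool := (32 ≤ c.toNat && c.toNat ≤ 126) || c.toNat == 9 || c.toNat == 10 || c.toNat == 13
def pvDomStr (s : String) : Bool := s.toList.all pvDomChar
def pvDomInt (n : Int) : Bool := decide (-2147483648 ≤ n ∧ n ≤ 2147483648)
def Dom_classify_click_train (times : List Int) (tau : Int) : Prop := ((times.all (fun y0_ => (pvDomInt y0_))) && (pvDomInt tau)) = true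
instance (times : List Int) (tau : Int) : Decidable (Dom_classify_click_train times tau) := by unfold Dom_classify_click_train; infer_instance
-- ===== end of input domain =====

-- B replaces A's groups-list build plus three counting passes by one pass with three
-- counters and a running run-size (objective: simpler, O(1) extra space, same O(n) time).

-- ===== PORT A =====
-- A's loop body: append t to current if the gap is ≤ tau, else close current into groups.
-- current is always nonempty, so Python's current[-1] is its last element (getLast!).
def pvStepA (tau : Int) (gc : List (List Int) × List Int) (t : Int) :
    List (List Int) × List Int :=
  if t - gc.2.getLast! ≤ tau then (gc.1, gc.2 ++ [t]) else (gc.1 ++ [gc.2], [t])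

def classify_click_train (times : List Int) (tau : Int) : Int × Int × Int :=
  match times with
  | [] => (0, 0, 0)
  | t0 :: rest =>
    let st := rest.foldl (pvStepA tau) ([], [t0])
    let groups := st.1 ++ [st.2]
    (((groups.filter (fun g => g.length == 1)).length : Int),
     ((groups.filter (fun g => g.length == 2)).length : Int),
     ((groups.filter (fun g => g.length ≥ 4)).length : Int))

-- ===== PORT B =====
-- closing a run of size `size`: the if/elif chain shared by B's loop body and its final step.
def pvClose (c : Int × Int × Int) (size : Int) : Int × Int × Int :=
  if size = 1 then (c.1 + 1, c.2.1, c.2.2)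
  else if size = 2 then (c.1, c.2.1 + 1, c.2.2)
  else if size ≥ 4 then (c.1, c.2.1, c.2.2 + 1)
  else c

-- B's loop body: state = (counters, run size, prev time).
def pvStepB (tau : Int) (s : (Int × Int × Int) × Int × Int) (t : Int) :
    (Int × Int × Int) × Int × Int :=
  if t - s.2.2 ≤ tau then (s.1, s.2.1 + 1, t) else (pvClose s.1 s.2.1, 1, t)

def classify_click_train_alt (times : List Int) (tau : Int) : Int × Int × Int :=
  match times with
  | [] => (0, 0, 0)
  | t0 :: rest =>
    let st := rest.foldl (pvStepB tau) (((0, 0, 0), 1, t0))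
    pvClose st.1 st.2.1

-- ===== PRECONDITION & SPEC =====
def Spec_classify_click_train (times : List Int) (tau : Int) (out : Int × Int × Int) : Prop := out = classify_click_train_alt times tau
instance (times : List Int) (tau : Int) (out : Int × Int × Int) : Decidable (Spec_classify_click_train times tau out) := by unfold Spec_classify_click_train; infer_instance

-- ===== CLAIM (what is proved, stated in full; the proofs are below) =====
def Claim_equal_classify_click_train : Prop := ∀ (times : List Int) (tau : Int), Dom_classify_click_train times tau → Spec_classify_click_train times tau (classify_click_train times tau)

-- ===== LEMMAS AND PROOFS =====

def pvCounts (gs : List (List Int)) : Int × Int × Int :=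
  (((gs.filter (fun g => g.length == 1)).length : Int),
   ((gs.filter (fun g => g.length == 2)).length : Int),
   ((gs.filter (fun g => g.length ≥ 4)).length : Int))

theorem pvCounts_append (gs : List (List Int)) (g : List Int) :
    pvCounts (gs ++ [g]) = pvClose (pvCounts gs) (g.length : Int) := by
  simp only [pvCounts, pvClose, List.filter_append, List.filter_cons, List.filter_nil,
    List.length_append, beq_iff_eq, ge_iff_le, decide_eq_true_eq]
  split_ifs <;> simp_all [Prod.mk.injEq] <;> omega

theorem pvLoop (tau : Int) (rest : List Int) (gs : List (List Int)) (cur : List Int)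
    (hcur : cur ≠ []) :
    pvClose (rest.foldl (pvStepB tau) (pvCounts gs, (cur.length : Int), cur.getLast!)).1
        (rest.foldl (pvStepB tau) (pvCounts gs, (cur.length : Int), cur.getLast!)).2.1
    = pvCounts ((rest.foldl (pvStepA tau) (gs, cur)).1
        ++ [(rest.foldl (pvStepA tau) (gs, cur)).2]) := by
  induction rest generalizing gs cur with
  | nil => simpa using (pvCounts_append gs cur).symm
  | cons t rest ih =>
    simp only [List.foldl_cons]
    by_cases h : t - cur.getLast! ≤ tau
    · have eB : pvStepB tau (pvCounts gs, (cur.length : Int), cur.getLast!) t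
          = (pvCounts gs, ((cur ++ [t]).length : Int), (cur ++ [t]).getLast!) := by
        unfold pvStepB
        rw [if_pos h]
        simp [List.length_append]
      have eA : pvStepA tau (gs, cur) t = (gs, cur ++ [t]) := by
        unfold pvStepA
        rw [if_pos h]
      rw [eB, eA]
      exact ih gs (cur ++ [t]) (by simp)
    · have eB : pvStepB tau (pvCounts gs, (cur.length : Int), cur.getLast!) t
          = (pvCounts (gs ++ [cur]), ((([t] : List Int).length : Int)), ([t] : List Int).getLast!) := by
        unfold pvStepB
        rw [if_neg h, pvCounts_append]
        simp
      have eA : pvStepA tau (gs, cur) t = (gs ++ [cur], [t]) := by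
        unfold pvStepA
        rw [if_neg h]
      rw [eB, eA]
      exact ih (gs ++ [cur]) [t] (by simp)

-- ===== VERDICT (by name: the statement is the Claim_ definition above) =====
theorem classify_click_train_spec : Claim_equal_classify_click_train := by
  intro times tau _
  unfold Spec_classify_click_train classify_click_train classify_click_train_alt
  cases times with
  | nil => rfl
  | cons t0 rest =>
    have h := pvLoop tau rest [] [t0] (by simp)
    simp only [pvCounts] at h
    simpa using h.symm
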